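-- pv_equiv track=rewrite | github.com/sayeduzzaman-bracu/python_report_automation | automation.py | build_header_map
-- ===== SOURCE A (Python) =====
-- COLUMN_ALIASES = {
--     "order_id": [
--         "order_id",
--         "transaction_id",
--         "invoice_id",
--         "sale_id",
--         "id",
--     ],
--     "order_date": [
--         "order_date",
--         "transaction_date",
--         "date",
--         "sale_date",
--         "invoice_date",
--     ],
--     "customer_name": [
--         "customer_name",
--         "customer",
--         "customer_id",
--         "client_name",
--         "client",
--         "buyer",
--     ],
--     "product": [
--         "product",
--         "item",
--         "product_name",
--         "item_name",
--         "service",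
--     ],
--     "category": [
--         "category",
--         "product_category",
--         "item_category",
--         "department",
--         "type",
--     ],
--     "quantity": [
--         "quantity",
--         "qty",
--         "units",
--         "count",
--     ],
--     "unit_price": [
--         "unit_price",
--         "price_per_unit",
--         "price",
--         "unit cost",
--         "rate",
--     ],
--     "total_spent": [
--         "total_spent",
--         "total",
--         "total_amount",
--         "amount",
--         "revenue",
--         "sales",
--         "line_total",
--     ],
--     "city": [
--         "city",
--         "location",
--         "branch",
--         "area",
--         "region",
--         "store_location",
--     ],
-- }
--
-- def clean_text(value) -> str:
--     """Trim whitespace safely."""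
--     if value is None:
--         return ""
--     return str(value).strip()
--
-- def normalize_header(header: str) -> str:
--     """Normalize CSV header for alias matching."""
--     return clean_text(header).lower().replace("-", "_").replace(" ", "_")
--
-- def build_header_map(fieldnames: list[str]) -> dict:
--     """Build a map from standard field names to actual file headers."""
--     normalized_to_original = {
--         normalize_header(name): name for name in fieldnames
--     }
--
--     header_map = {}
--
--     for standard_name, alias_list in COLUMN_ALIASES.items():
--         for alias in alias_list:
--             normalized_alias = normalize_header(alias)
--             if normalized_alias in normalized_to_original:
--                 header_map[standard_name] = normalized_to_original[normalized_alias]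
--                 break
--
--     return header_map
-- ===== SOURCE B (Python) =====
-- COLUMN_ALIASES = {
--     "order_id": ["order_id", "transaction_id", "invoice_id", "sale_id", "id"],
--     "order_date": ["order_date", "transaction_date", "date", "sale_date", "invoice_date"],
--     "customer_name": ["customer_name", "customer", "customer_id", "client_name", "client", "buyer"],
--     "product": ["product", "item", "product_name", "item_name", "service"],
--     "category": ["category", "product_category", "item_category", "department", "type"],
--     "quantity": ["quantity", "qty", "units", "count"],
--     "unit_price": ["unit_price", "price_per_unit", "price", "unit cost", "rate"],
--     "total_spent": ["total_spent", "total", "total_amount", "amount", "revenue", "sales", "line_total"],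
--     "city": ["city", "location", "branch", "area", "region", "store_location"],
-- }
--
--
-- def clean_text(value) -> str:
--     if value is None:
--         return ""
--     return str(value).strip()
--
--
-- def normalize_header(header: str) -> str:
--     return clean_text(header).lower().replace("-", "_").replace(" ", "_")
--
--
-- def _match(normalized: str):
--     """First (standard_name, alias_rank) whose alias normalizes to `normalized`."""
--     for standard_name, alias_list in COLUMN_ALIASES.items():
--         for rank, alias in enumerate(alias_list):
--             if normalize_header(alias) == normalized:
--                 return standard_name, rank
--     return None
--
--
-- def build_header_map(fieldnames: list[str]) -> dict:
--     """Single pass over fieldnames: classify each header, keep the best-ranked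
--     (and, at equal rank, the latest) header per standard field."""
--     best = {}
--     for name in fieldnames:
--         m = _match(normalize_header(name))
--         if m is not None:
--             standard_name, rank = m
--             if standard_name not in best or rank <= best[standard_name][0]:
--                 best[standard_name] = (rank, name)
--     return {std: best[std][1] for std in COLUMN_ALIASES if std in best}
-- ===== Notes on version B (the rewrite author's own statement) =====
-- stated objective: alternative
-- what changed: B inverts the iteration: instead of indexing fieldnames and looping aliases per standard with a break, it makes one pass over fieldnames, classifies each header to its (standard, alias-rank), and keeps per standard the lowest-ranked (latest at equal rank) header, emitting the result in COLUMN_ALIASES order.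
import Mathlib
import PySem

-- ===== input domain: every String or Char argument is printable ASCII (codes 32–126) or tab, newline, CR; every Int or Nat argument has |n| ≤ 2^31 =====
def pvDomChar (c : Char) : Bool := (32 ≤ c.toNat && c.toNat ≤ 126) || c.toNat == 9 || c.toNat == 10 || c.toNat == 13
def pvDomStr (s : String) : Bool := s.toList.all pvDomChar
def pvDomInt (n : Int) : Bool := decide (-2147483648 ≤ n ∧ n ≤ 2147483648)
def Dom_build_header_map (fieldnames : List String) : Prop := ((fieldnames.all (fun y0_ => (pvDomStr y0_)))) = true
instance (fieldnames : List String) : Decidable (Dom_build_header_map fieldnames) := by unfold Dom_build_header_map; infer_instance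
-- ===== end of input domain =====

-- B inverts the loops: one pass over fieldnames classifying each header to its (standard, alias-rank)
-- and keeping the best-ranked (latest at equal rank) header per standard (alternative decomposition, same results).

-- shared by both ports: the module constant COLUMN_ALIASES and normalize_header
def pvColumnAliases : List (String × List String) :=
  [ ("order_id", ["order_id", "transaction_id", "invoice_id", "sale_id", "id"]),
    ("order_date", ["order_date", "transaction_date", "date", "sale_date", "invoice_date"]),
    ("customer_name", ["customer_name", "customer", "customer_id", "client_name", "client", "buyer"]),
    ("product", ["product", "item", "product_name", "item_name", "service"]),
    ("category", ["category", "product_category", "item_category", "department", "type"]),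
    ("quantity", ["quantity", "qty", "units", "count"]),
    ("unit_price", ["unit_price", "price_per_unit", "price", "unit cost", "rate"]),
    ("total_spent", ["total_spent", "total", "total_amount", "amount", "revenue", "sales", "line_total"]),
    ("city", ["city", "location", "branch", "area", "region", "store_location"]) ]

-- clean_text on a str argument is just strip; then lower, replace "-" "_", replace " " "_"
def pvNormalizeHeader (header : String) : String :=
  PySem.Str.replace (PySem.Str.replace (PySem.Str.lower (PySem.Str.strip header)) "-" "_") " " "_"

-- ===== PORT A =====
-- inner alias loop of A: first alias found in the dict wins, then break
def pvAliasLoopA (d : PySem.Dict String String) (hm : PySem.Dict String String)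
    (std : String) : List String → PySem.Dict String String
  | [] => hm
  | alias_ :: rest =>
    match d.get? (pvNormalizeHeader alias_) with
    | some orig => hm.insert std orig
    | none => pvAliasLoopA d hm std rest

def build_header_map (fieldnames : List String) : List (String × String) :=
  let normalized_to_original : PySem.Dict String String :=
    fieldnames.foldl (fun d name => d.insert (pvNormalizeHeader name) name) PySem.Dict.empty
  (pvColumnAliases.foldl
    (fun hm p => pvAliasLoopA normalized_to_original hm p.1 p.2) PySem.Dict.empty).items

-- ===== PORT B =====
-- B's inner enumerate loop: first index in the alias list whose normalized alias equals n
def pvIdx (n : String) : List String → Nat → Option Nat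
  | [], _ => none
  | a :: rest, i => if pvNormalizeHeader a == n then some i else pvIdx n rest (i + 1)

-- B's _match: first (standard, rank) over the whole table whose alias normalizes to n
def pvMatchStd : List (String × List String) → String → Option (String × Nat)
  | [], _ => none
  | (std, al) :: rest, n =>
    match pvIdx n al 0 with
    | some r => some (std, r)
    | none => pvMatchStd rest n

-- B's loop body: classify one header, keep it if its rank beats (≤) the stored one
def pvStep (best : PySem.Dict String (Nat × String)) (name : String) : PySem.Dict String (Nat × String) :=
  match pvMatchStd pvColumnAliases (pvNormalizeHeader name) with
  | some (std, r) =>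
    match best.get? std with
    | none => best.insert std (r, name)
    | some br => if r ≤ br.1 then best.insert std (r, name) else best
  | none => best

def build_header_map_alt (fieldnames : List String) : List (String × String) :=
  let best := fieldnames.foldl pvStep PySem.Dict.empty
  (pvColumnAliases.foldl
    (fun hm p =>
      match best.get? p.1 with
      | some rn => hm.insert p.1 rn.2
      | none => hm) PySem.Dict.empty).items

-- ===== PRECONDITION & SPEC =====
def Spec_build_header_map (fieldnames : List String) (out : List (String × String)) : Prop := out = build_header_map_alt fieldnames
instance (fieldnames : List String) (out : List (String × String)) : Decidable (Spec_build_header_map fieldnames out) := by unfold Spec_build_header_map; infer_instance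

-- ===== CLAIM (what is proved, stated in full; the proofs are below) =====
def Claim_equal_build_header_map : Prop := ∀ (fieldnames : List String), Dom_build_header_map fieldnames → Spec_build_header_map fieldnames (build_header_map fieldnames)

-- ===== LEMMAS AND PROOFS =====

-- proof-only helpers ------------------------------------------------------

-- the LAST fieldname whose normalized form is t (what A's dict answers)
def pvLastMatch (fieldnames : List String) (t : String) : Option String :=
  fieldnames.foldl (fun acc name => if pvNormalizeHeader name == t then some name else acc) none

-- A's choice for one alias list, with ranks: first alias (from index i) that some fieldname
-- normalizes to, paired with the LAST such fieldname
def pvChooseRI (fs : List String) : List String → Nat → Option (Nat × String)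
  | [], _ => none
  | a :: rest, i =>
    match pvLastMatch fs (pvNormalizeHeader a) with
    | some m => some (i, m)
    | none => pvChooseRI fs rest (i + 1)

-- B's rank update, with the candidate rank as an Option
def pvUpdR (acc : Option (Nat × String)) (r : Nat) (x : String) : Option (Nat × String) :=
  match acc with
  | none => some (r, x)
  | some br => if r ≤ br.1 then some (r, x) else acc

def pvUpdO (acc : Option (Nat × String)) (o : Option Nat) (x : String) : Option (Nat × String) :=
  match o with
  | none => acc
  | some r => pvUpdR acc r x

-- A-side: the dict built by A answers get? exactly like the last-match scan
theorem get?_fold_insert (fs : List String) (d : PySem.Dict String String) (k : String) :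
    (fs.foldl (fun d n => d.insert (pvNormalizeHeader n) n) d).get? k
      = fs.foldl (fun acc n => if pvNormalizeHeader n == k then some n else acc) (d.get? k) := by
  induction fs generalizing d with
  | nil => rfl
  | cons n rest ih =>
    have hins : (d.insert (pvNormalizeHeader n) n).get? k
        = (if pvNormalizeHeader n == k then some n else d.get? k) := by
      rw [PySem.Dict.get?_insert]
      by_cases h : pvNormalizeHeader n = k
      · simp [h]
      · simp [h, Ne.symm h]
    simp only [List.foldl_cons, ih, hins]

theorem get?_eq_lastMatch (fs : List String) (k : String) :
    (fs.foldl (fun d n => d.insert (pvNormalizeHeader n) n) PySem.Dict.empty).get? k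
      = pvLastMatch fs k := by
  rw [get?_fold_insert, pvLastMatch, PySem.Dict.get?_empty]

-- A's alias loop, described by pvChooseRI (the rank component is ignored)
theorem aliasLoopA_eq_choose (fs : List String) (std : String) :
    ∀ (al : List String) (i : Nat) (hm : PySem.Dict String String),
      pvAliasLoopA (fs.foldl (fun d n => d.insert (pvNormalizeHeader n) n) PySem.Dict.empty) hm std al
        = (match pvChooseRI fs al i with
           | some rm => hm.insert std rm.2
           | none => hm) := by
  intro al
  induction al with
  | nil => intro i hm; rfl
  | cons a rest ih =>
    intro i hm
    simp only [pvAliasLoopA, pvChooseRI, get?_eq_lastMatch]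
    cases pvLastMatch fs (pvNormalizeHeader a) with
    | some m => rfl
    | none => exact ih (i + 1) hm

-- lower bounds on indices
theorem pvIdx_ge (n : String) : ∀ (al : List String) (i j : Nat), pvIdx n al i = some j → i ≤ j := by
  intro al
  induction al with
  | nil => intro i j h; simp [pvIdx] at h
  | cons a rest ih =>
    intro i j h
    simp only [pvIdx] at h
    split at h
    · cases h; omega
    · have := ih (i + 1) j h; omega

theorem chooseRI_ge (fs : List String) : ∀ (al : List String) (i : Nat) (rm : Nat × String),
    pvChooseRI fs al i = some rm → i ≤ rm.1 := by
  intro al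
  induction al with
  | nil => intro i rm h; simp [pvChooseRI] at h
  | cons a rest ih =>
    intro i rm h
    simp only [pvChooseRI] at h
    split at h
    · cases h; simp
    · have := ih (i + 1) rm h; omega

-- pvLastMatch over an appended element
theorem lastMatch_append (fs : List String) (x : String) (t : String) :
    pvLastMatch (fs ++ [x]) t
      = (if pvNormalizeHeader x == t then some x else pvLastMatch fs t) := by
  simp only [pvLastMatch, List.foldl_append, List.foldl_cons, List.foldl_nil]

theorem chooseRI_nil (al : List String) (i : Nat) : pvChooseRI [] al i = none := by
  induction al generalizing i with
  | nil => rfl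
  | cons a rest ih => simp only [pvChooseRI, pvLastMatch, List.foldl_nil]; exact ih (i + 1)

-- core step: appending one fieldname updates A's ranked choice exactly like B's rank update
theorem chooseRI_append (fs : List String) (x : String) :
    ∀ (al : List String) (i : Nat),
      pvChooseRI (fs ++ [x]) al i
        = pvUpdO (pvChooseRI fs al i) (pvIdx (pvNormalizeHeader x) al i) x := by
  intro al
  induction al with
  | nil => intro i; rfl
  | cons a rest ih =>
    intro i
    simp only [pvChooseRI, pvIdx, lastMatch_append]
    by_cases he : pvNormalizeHeader a = pvNormalizeHeader x
    · cases hlm : pvLastMatch fs (pvNormalizeHeader a) with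
      | some m => simp [he, pvUpdO, pvUpdR]
      | none =>
        cases hc : pvChooseRI fs rest (i + 1) with
        | none => simp [he, pvUpdO, pvUpdR]
        | some rm =>
          have hge := chooseRI_ge fs rest (i + 1) rm hc
          simp only [he, beq_self_eq_true, if_true, pvUpdO, pvUpdR]
          rw [if_pos (by omega)]
    · have hne : pvNormalizeHeader x ≠ pvNormalizeHeader a := fun h => he h.symm
      cases hlm : pvLastMatch fs (pvNormalizeHeader a) with
      | some m =>
        cases hi : pvIdx (pvNormalizeHeader x) rest (i + 1) with
        | none => simp [he, hne, pvUpdO]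
        | some j =>
          have hge := pvIdx_ge (pvNormalizeHeader x) rest (i + 1) j hi
          simp only [he, hne, beq_iff_eq, if_false, pvUpdO, pvUpdR]
          rw [if_neg (by omega)]
      | none => simp only [he, hne, beq_iff_eq, if_false]; exact ih (i + 1)

-- B's single pass over fieldnames computes pvChooseRI (pure version of B's fold)
theorem foldl_updO_eq_chooseRI (al : List String) :
    ∀ (fs : List String),
      fs.foldl (fun acc name => pvUpdO acc (pvIdx (pvNormalizeHeader name) al 0) name) none
        = pvChooseRI fs al 0 := by
  intro fs
  induction fs using List.reverseRecOn with
  | nil => exact (chooseRI_nil al 0).symm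
  | append_singleton fs x ih =>
    rw [List.foldl_append, List.foldl_cons, List.foldl_nil, ih, chooseRI_append]

-- generic forms of B's loop body (table value abstracted, so goals stay small)
def pvStepD (o : Option (String × Nat)) (best : PySem.Dict String (Nat × String))
    (name : String) : PySem.Dict String (Nat × String) :=
  match o with
  | some (std, r) =>
    match best.get? std with
    | none => best.insert std (r, name)
    | some br => if r ≤ br.1 then best.insert std (r, name) else best
  | none => best

def pvSel (o : Option (String × Nat)) (std : String) (acc : Option (Nat × String))
    (name : String) : Option (Nat × String) :=
  match o with
  | some sr => if sr.1 = std then pvUpdR acc sr.2 name else acc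
  | none => acc

def pvProj (o : Option (String × Nat)) (std : String) : Option Nat :=
  match o with
  | some sr => if sr.1 = std then some sr.2 else none
  | none => none

theorem pvStep_eq (best : PySem.Dict String (Nat × String)) (name : String) :
    pvStep best name = pvStepD (pvMatchStd pvColumnAliases (pvNormalizeHeader name)) best name := by
  unfold pvStep pvStepD
  generalize pvMatchStd pvColumnAliases (pvNormalizeHeader name) = o
  rcases o with _ | ⟨s, r⟩ <;> rfl

theorem pvStepD_get? (o : Option (String × Nat)) (best : PySem.Dict String (Nat × String))
    (name : String) (std : String) :
    (pvStepD o best name).get? std = pvSel o std (best.get? std) name := by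
  rcases o with _ | ⟨s, r⟩
  · rfl
  · unfold pvStepD pvSel
    by_cases hs : s = std
    · subst hs
      cases hb : best.get? s with
      | none => simp [pvUpdR, hb]
      | some br =>
        by_cases hr : r ≤ br.1
        · simp [pvUpdR, hb, hr]
        · simp [pvUpdR, hb, hr]
    · have hs' : std ≠ s := fun h => hs h.symm
      cases hb : best.get? s with
      | none => simp [hb, PySem.Dict.get?_insert, hs', hs]
      | some br =>
        by_cases hr : r ≤ br.1
        · simp [hb, hr, PySem.Dict.get?_insert, hs', hs]
        · simp [hb, hr, hs]

-- the projection of B's dict fold onto one standard name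
theorem foldl_step_get? (std : String) :
    ∀ (fs : List String) (best : PySem.Dict String (Nat × String)),
      (fs.foldl pvStep best).get? std
        = fs.foldl
            (fun acc name => pvSel (pvMatchStd pvColumnAliases (pvNormalizeHeader name)) std acc name)
            (best.get? std) := by
  intro fs
  induction fs with
  | nil => intro best; rfl
  | cons name rest ih =>
    intro best
    rw [List.foldl_cons, List.foldl_cons, ih, pvStep_eq, pvStepD_get?]

-- pvMatchStd only returns a standard that heads the table
theorem matchStd_mem : ∀ (tbl : List (String × List String)) (n : String) (sr : String × Nat),
    pvMatchStd tbl n = some sr → sr.1 ∈ tbl.map Prod.fst := by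
  intro tbl
  induction tbl with
  | nil => intro n sr h; simp [pvMatchStd] at h
  | cons p rest ih =>
    intro n sr h
    obtain ⟨std, al⟩ := p
    simp only [pvMatchStd] at h
    split at h
    · cases h; simp
    · simpa using Or.inr (ih n sr h)

-- a successful pvIdx means n occurs among the normalized aliases
theorem pvIdx_mem (n : String) : ∀ (al : List String) (i j : Nat),
    pvIdx n al i = some j → n ∈ al.map pvNormalizeHeader := by
  intro al
  induction al with
  | nil => intro i j h; simp [pvIdx] at h
  | cons a rest ih =>
    intro i j h
    simp only [pvIdx] at h
    split at h
    · rename_i hEq; simp at hEq; simp [hEq]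
    · simpa using Or.inr (ih (i + 1) j h)

-- under table-wide uniqueness, the per-standard projection of _match is pvIdx on that
-- standard's own alias list
theorem matchStd_proj : ∀ (tbl : List (String × List String)) (std : String) (al : List String),
    (tbl.map Prod.fst).Nodup →
    ((tbl.flatMap Prod.snd).map pvNormalizeHeader).Nodup →
    (std, al) ∈ tbl →
    ∀ n, pvProj (pvMatchStd tbl n) std = pvIdx n al 0 := by
  intro tbl
  induction tbl with
  | nil => intro std al _ _ hmem; simp at hmem
  | cons p rest ih =>
    intro std al hstd hnorm hmem n
    obtain ⟨s0, al0⟩ := p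
    simp only [List.map_cons, List.nodup_cons] at hstd
    have hflat : ((al0 ++ rest.flatMap Prod.snd).map pvNormalizeHeader).Nodup := by
      simpa [List.flatMap_cons] using hnorm
    rw [List.map_append] at hflat
    have hdisj := (List.nodup_append.mp hflat).2.2
    rcases List.mem_cons.mp hmem with hhead | htail
    · -- the entry is the head: std = s0, al = al0
      obtain ⟨rfl, rfl⟩ := Prod.mk.inj hhead
      simp only [pvMatchStd]
      cases hidx : pvIdx n al 0 with
      | some r => simp [pvProj]
      | none =>
        cases hm : pvMatchStd rest n with
        | none => simp [pvProj]
        | some sr =>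
          have : sr.1 ∈ rest.map Prod.fst := matchStd_mem rest n sr hm
          have hne : sr.1 ≠ std := fun h => hstd.1 (h ▸ this)
          simp [pvProj, hne]
    · -- the entry is in the tail
      have hrec := ih std al hstd.2 (List.nodup_append.mp hflat).2.1 htail n
      simp only [pvMatchStd]
      cases hidx : pvIdx n al0 0 with
      | none => exact hrec
      | some r0 =>
        -- head matched: its standard is not ours, and our list cannot also contain n
        have hne : s0 ≠ std := by
          intro h
          exact hstd.1 (h ▸ (List.mem_map.mpr ⟨(std, al), htail, h ▸ rfl⟩))
        have h1 : n ∈ al0.map pvNormalizeHeader := pvIdx_mem n al0 0 r0 hidx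
        have hnone : pvIdx n al 0 = none := by
          cases h2 : pvIdx n al 0 with
          | none => rfl
          | some j =>
            have hmem2 : n ∈ (rest.flatMap Prod.snd).map pvNormalizeHeader := by
              rcases List.mem_map.mp (pvIdx_mem n al 0 j h2) with ⟨a, ha, rfl⟩
              exact List.mem_map.mpr ⟨a, List.mem_flatMap.mpr ⟨(std, al), htail, ha⟩, rfl⟩
            exact absurd rfl (hdisj _ h1 _ hmem2)
        simp [pvProj, hne, hnone]

theorem nodup_stds : (pvColumnAliases.map Prod.fst).Nodup := by decide

theorem nodup_norms : ((pvColumnAliases.flatMap Prod.snd).map pvNormalizeHeader).Nodup := by decide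

-- per standard: B's dict after the pass answers get? with pvChooseRI
theorem best_get?_eq_choose (fs : List String) (std : String) (al : List String)
    (hmem : (std, al) ∈ pvColumnAliases) :
    (fs.foldl pvStep PySem.Dict.empty).get? std = pvChooseRI fs al 0 := by
  rw [foldl_step_get? std fs PySem.Dict.empty, PySem.Dict.get?_empty]
  rw [show (fun (acc : Option (Nat × String)) (name : String) =>
        pvSel (pvMatchStd pvColumnAliases (pvNormalizeHeader name)) std acc name)
      = (fun acc name => pvUpdO acc (pvIdx (pvNormalizeHeader name) al 0) name) from ?_]
  · exact foldl_updO_eq_chooseRI al fs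
  · funext acc name
    have h := matchStd_proj pvColumnAliases std al nodup_stds nodup_norms hmem (pvNormalizeHeader name)
    rw [← h]
    generalize pvMatchStd pvColumnAliases (pvNormalizeHeader name) = o
    rcases o with _ | ⟨s, r⟩
    · rfl
    · by_cases hs : s = std <;> simp [pvSel, pvProj, pvUpdO, hs]

-- ===== VERDICT (by name: the statement is the Claim_ definition above) =====
theorem build_header_map_spec : Claim_equal_build_header_map := by
  intro fieldnames _
  unfold Spec_build_header_map build_header_map build_header_map_alt
  have hfold := PySem.List.foldl_congr_mem pvColumnAliases
    (fun hm p => pvAliasLoopA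
      (fieldnames.foldl (fun d name => d.insert (pvNormalizeHeader name) name) PySem.Dict.empty) hm p.1 p.2)
    (fun hm p =>
      match (fieldnames.foldl pvStep PySem.Dict.empty).get? p.1 with
      | some rn => hm.insert p.1 rn.2
      | none => hm)
    PySem.Dict.empty
    (by
      intro hm p hp
      obtain ⟨std, al⟩ := p
      simp only []
      rw [aliasLoopA_eq_choose fieldnames std al 0 hm,
          best_get?_eq_choose fieldnames std al hp])
  exact congrArg PySem.Dict.items hfold
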